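-- pv_equiv track=rewrite | github.com/AbdulsemedA/Competitive-Programming | 94-X_sum/xsum.py | xsum
-- ===== SOURCE A (Python) =====
-- def xsum(x) -> int:
--     forward = {}
--     backward = {}
--     maximum = 0
--
--     for row in range(len(x)):
--         for col in range(len(x[0])):
--             forward[row+col] = x[row][col] + forward.get(row+col,0)
--             backward[row-col] = x[row][col] + backward.get(row-col,0)
--
--     for row in range(len(x)):
--         for col in range(len(x[0])):
--             maximum = max(maximum, forward[row+col] + backward[row-col] - x[row][col])
--
--     return maximum
-- ===== SOURCE B (Python) =====
-- def xsum(x) -> int: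
--     m = len(x[0]) if x else 0
--     best = 0
--     for r in range(len(x)):
--         for c in range(m):
--             f = sum(x[i][j] for i in range(len(x)) for j in range(m) if i + j == r + c)
--             b = sum(x[i][j] for i in range(len(x)) for j in range(m) if i - j == r - c)
--             best = max(best, f + b - x[r][c])
--     return best
-- ===== Notes on version B (the rewrite author's own statement) =====
-- stated objective: simpler
-- what changed: B drops A's two precomputed diagonal-sum dicts and the separate second pass: for each cell it recomputes the forward/backward diagonal sums by a direct scan of the grid and keeps a running max, a plain brute force with no auxiliary tables.
import Mathlib
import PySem

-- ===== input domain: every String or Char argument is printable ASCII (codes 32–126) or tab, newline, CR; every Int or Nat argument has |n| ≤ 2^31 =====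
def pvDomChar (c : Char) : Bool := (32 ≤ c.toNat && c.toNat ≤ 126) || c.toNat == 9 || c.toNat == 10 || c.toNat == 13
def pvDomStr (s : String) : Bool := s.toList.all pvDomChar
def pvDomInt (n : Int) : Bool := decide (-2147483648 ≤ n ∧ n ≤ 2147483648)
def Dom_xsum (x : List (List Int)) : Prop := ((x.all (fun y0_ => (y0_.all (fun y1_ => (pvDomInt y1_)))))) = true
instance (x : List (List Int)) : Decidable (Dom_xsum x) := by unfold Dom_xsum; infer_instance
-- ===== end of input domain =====

-- B replaces A's two precomputed diagonal-sum dicts and second pass by a direct per-cell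
-- rescan of the grid with a running max (simpler, no auxiliary tables); return values only.

-- x[i] as a list (rows are only accessed at in-range indices on Pre_)
def pvRow (x : List (List Int)) (i : Int) : List Int := (PySem.List.pyGet? x i).getD []

-- ===== PORT A =====
-- first pass of A: build the two diagonal-sum dicts (forward keyed by row+col, backward by row-col)
def xsumDicts (x : List (List Int)) : PySem.Dict Int Int × PySem.Dict Int Int :=
  (PySem.List.pyRange 0 (x.length : Int) 1).foldl
    (fun (st : PySem.Dict Int Int × PySem.Dict Int Int) row =>
      (PySem.List.pyRange 0 ((pvRow x 0).length : Int) 1).foldl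
        (fun st2 col =>
          (st2.1.insert (row + col) (PySem.List.pyGetD (pvRow x row) col 0 + st2.1.getD (row + col) 0),
           st2.2.insert (row - col) (PySem.List.pyGetD (pvRow x row) col 0 + st2.2.getD (row - col) 0)))
        st)
    (PySem.Dict.empty, PySem.Dict.empty)

def xsum (x : List (List Int)) : Int :=
  (PySem.List.pyRange 0 (x.length : Int) 1).foldl
    (fun m row =>
      (PySem.List.pyRange 0 ((pvRow x 0).length : Int) 1).foldl
        (fun m2 col =>
          max m2 ((xsumDicts x).1.getD (row + col) 0 + (xsumDicts x).2.getD (row - col) 0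
                  - PySem.List.pyGetD (pvRow x row) col 0))
        m)
    0

-- ===== PORT B =====
-- m = len(x[0]) if x else 0
def pvM (x : List (List Int)) : Int := if x.isEmpty then 0 else ((pvRow x 0).length : Int)

def xsum_alt (x : List (List Int)) : Int :=
  (PySem.List.pyRange 0 (x.length : Int) 1).foldl
    (fun best r =>
      (PySem.List.pyRange 0 (pvM x) 1).foldl
        (fun best2 c =>
          let f :=
            (PySem.List.pyRange 0 (x.length : Int) 1).foldl
              (fun s i =>
                (PySem.List.pyRange 0 (pvM x) 1).foldl
                  (fun s2 j =>
                    if i + j == r + c then s2 + PySem.List.pyGetD (pvRow x i) j 0 else s2)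
                  s)
              0
          let b :=
            (PySem.List.pyRange 0 (x.length : Int) 1).foldl
              (fun s i =>
                (PySem.List.pyRange 0 (pvM x) 1).foldl
                  (fun s2 j =>
                    if i - j == r - c then s2 + PySem.List.pyGetD (pvRow x i) j 0 else s2)
                  s)
              0
          max best2 (f + b - PySem.List.pyGetD (pvRow x r) c 0))
        best)
    0

-- ===== PRECONDITION & SPEC =====
-- Pre_ excludes exactly the inputs on which A raises IndexError: grids with a row shorter
-- than the first row.
def Pre_xsum (x : List (List Int)) : Prop := ∀ row ∈ x, (x.headD []).length ≤ row.length
instance (x : List (List Int)) : Decidable (Pre_xsum x) := by unfold Pre_xsum; infer_instance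
def pvWitness_xsum : List (List Int) := [[1, 2], [3, 4]]
def Spec_xsum (x : List (List Int)) (out : Int) : Prop := out = xsum_alt x
instance (x : List (List Int)) (out : Int) : Decidable (Spec_xsum x out) := by unfold Spec_xsum; infer_instance

-- ===== CLAIM (what is proved, stated in full; the proofs are below) =====
def Claim_equal_xsum : Prop := ∀ (x : List (List Int)), Dom_xsum x → Pre_xsum x → Spec_xsum x (xsum x)

-- ===== LEMMAS AND PROOFS =====

-- cell value, grid width, and the row-major list of all cell coordinates
def pvVal (x : List (List Int)) (p : Int × Int) : Int := PySem.List.pyGetD (pvRow x p.1) p.2 0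
def pvW (x : List (List Int)) : Int := ((pvRow x 0).length : Int)
def pvCells (x : List (List Int)) : List (Int × Int) :=
  (PySem.List.pyRange 0 (x.length : Int) 1).flatMap
    (fun r => (PySem.List.pyRange 0 (pvW x) 1).map (fun c => (r, c)))

-- sums over the forward (row+col = t) and backward (row-col = t) diagonals
def pvFd (x : List (List Int)) (t : Int) : Int :=
  (((pvCells x).filter (fun p => p.1 + p.2 == t)).map (pvVal x)).sum
def pvBd (x : List (List Int)) (t : Int) : Int :=
  (((pvCells x).filter (fun p => p.1 - p.2 == t)).map (pvVal x)).sum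

-- common normal form of both programs: running max of the cross value over all cells
def pvNorm (x : List (List Int)) : Int :=
  (pvCells x).foldl (fun m p => max m (pvFd x (p.1 + p.2) + pvBd x (p.1 - p.2) - pvVal x p)) 0

-- A's dict-building step, on a (row, col) pair
def pvPairStep (x : List (List Int)) (st : PySem.Dict Int Int × PySem.Dict Int Int)
    (p : Int × Int) : PySem.Dict Int Int × PySem.Dict Int Int :=
  (st.1.insert (p.1 + p.2) (pvVal x p + st.1.getD (p.1 + p.2) 0),
   st.2.insert (p.1 - p.2) (pvVal x p + st.2.getD (p.1 - p.2) 0))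

-- a fold over the row-major cell list is the nested row/col double loop
theorem pv_flatten {γ : Type} (n w : Int) (F : γ → Int × Int → γ) (init : γ) :
    ((PySem.List.pyRange 0 n 1).flatMap
        (fun r => (PySem.List.pyRange 0 w 1).map (fun c => (r, c)))).foldl F init
      = (PySem.List.pyRange 0 n 1).foldl
          (fun acc r => (PySem.List.pyRange 0 w 1).foldl (fun acc2 c => F acc2 (r, c)) acc)
          init := by
  simp [List.foldl_flatMap, List.foldl_map]

-- a guarded accumulation loop is the sum over the filtered list
theorem pv_foldl_if_add {α : Type} (c : α → Bool) (v : α → Int) (l : List α) (a : Int) :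
    l.foldl (fun s p => if c p then s + v p else s) a = a + ((l.filter c).map v).sum := by
  induction l generalizing a with
  | nil => simp
  | cons hd tl ih =>
    by_cases h : c hd
    · simp [ih, h]; omega
    · simp [ih, h]

-- lookup in the dicts A builds = diagonal sum over the processed cells
theorem pv_build_fst (x : List (List Int)) (L : List (Int × Int)) :
    ∀ (d1 d2 : PySem.Dict Int Int) (q : Int),
      ((L.foldl (pvPairStep x) (d1, d2)).1).getD q 0
        = d1.getD q 0 + ((L.filter (fun p => p.1 + p.2 == q)).map (pvVal x)).sum := by
  induction L with
  | nil => intro d1 d2 q; simp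
  | cons p tl ih =>
    intro d1 d2 q
    by_cases h : p.1 + p.2 = q
    · simp [pvPairStep, ih, h]; omega
    · have h' : q ≠ p.1 + p.2 := fun hh => h hh.symm
      simp [pvPairStep, ih, PySem.Dict.getD_insert, h']
      rw [List.filter_cons_of_neg (by simp [h])]

theorem pv_build_snd (x : List (List Int)) (L : List (Int × Int)) :
    ∀ (d1 d2 : PySem.Dict Int Int) (q : Int),
      ((L.foldl (pvPairStep x) (d1, d2)).2).getD q 0
        = d2.getD q 0 + ((L.filter (fun p => p.1 - p.2 == q)).map (pvVal x)).sum := by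
  induction L with
  | nil => intro d1 d2 q; simp
  | cons p tl ih =>
    intro d1 d2 q
    by_cases h : p.1 - p.2 = q
    · simp [pvPairStep, ih, h]; omega
    · have h' : q ≠ p.1 - p.2 := fun hh => h hh.symm
      simp [pvPairStep, ih, PySem.Dict.getD_insert, h']
      rw [List.filter_cons_of_neg (by simp [h])]

theorem pv_xsumDicts_eq (x : List (List Int)) :
    xsumDicts x = (pvCells x).foldl (pvPairStep x) (PySem.Dict.empty, PySem.Dict.empty) := by
  rw [pvCells, pv_flatten]; rfl

theorem pv_fb_fst (x : List (List Int)) (q : Int) :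
    (xsumDicts x).1.getD q 0 = pvFd x q := by
  rw [pv_xsumDicts_eq, pv_build_fst, pvFd, PySem.Dict.getD_empty, zero_add]

theorem pv_fb_snd (x : List (List Int)) (q : Int) :
    (xsumDicts x).2.getD q 0 = pvBd x q := by
  rw [pv_xsumDicts_eq, pv_build_snd, pvBd, PySem.Dict.getD_empty, zero_add]

theorem pv_pvM_eq (x : List (List Int)) : pvM x = pvW x := by
  cases x <;> simp [pvM, pvW, pvRow]

-- A equals the normal form (no precondition needed: A already loops over the first row's width)
theorem pv_lemA (x : List (List Int)) : xsum x = pvNorm x := by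
  rw [xsum, pvNorm, pvCells, pv_flatten]
  apply PySem.List.foldl_congr_mem
  intro acc r _
  apply PySem.List.foldl_congr_mem
  intro acc2 c _
  rw [pv_fb_fst, pv_fb_snd]
  rfl

-- B's inner forward-diagonal sum equals pvFd
theorem pv_sumF_eq (x : List (List Int)) (t : Int) :
    (PySem.List.pyRange 0 (x.length : Int) 1).foldl
        (fun s i =>
          (PySem.List.pyRange 0 (pvM x) 1).foldl
            (fun s2 j => if i + j == t then s2 + PySem.List.pyGetD (pvRow x i) j 0 else s2) s)
        0
      = pvFd x t := by
  have step1 :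
      (PySem.List.pyRange 0 (x.length : Int) 1).foldl
          (fun s i =>
            (PySem.List.pyRange 0 (pvM x) 1).foldl
              (fun s2 j => if i + j == t then s2 + PySem.List.pyGetD (pvRow x i) j 0 else s2) s)
          0
        = (pvCells x).foldl
            (fun s p => if p.1 + p.2 == t then s + pvVal x p else s) 0 := by
    rw [pvCells, pv_flatten, ← pv_pvM_eq]
    apply PySem.List.foldl_congr_mem
    intro acc i _
    exact PySem.List.foldl_congr_mem _ _ _ _ (fun _ _ _ => rfl)
  rw [step1, pv_foldl_if_add, pvFd, zero_add]

-- B's inner backward-diagonal sum equals pvBd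
theorem pv_sumB_eq (x : List (List Int)) (t : Int) :
    (PySem.List.pyRange 0 (x.length : Int) 1).foldl
        (fun s i =>
          (PySem.List.pyRange 0 (pvM x) 1).foldl
            (fun s2 j => if i - j == t then s2 + PySem.List.pyGetD (pvRow x i) j 0 else s2) s)
        0
      = pvBd x t := by
  have step1 :
      (PySem.List.pyRange 0 (x.length : Int) 1).foldl
          (fun s i =>
            (PySem.List.pyRange 0 (pvM x) 1).foldl
              (fun s2 j => if i - j == t then s2 + PySem.List.pyGetD (pvRow x i) j 0 else s2) s)
          0
        = (pvCells x).foldl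
            (fun s p => if p.1 - p.2 == t then s + pvVal x p else s) 0 := by
    rw [pvCells, pv_flatten, ← pv_pvM_eq]
    apply PySem.List.foldl_congr_mem
    intro acc i _
    exact PySem.List.foldl_congr_mem _ _ _ _ (fun _ _ _ => rfl)
  rw [step1, pv_foldl_if_add, pvBd, zero_add]

-- B equals the normal form
theorem pv_lemB (x : List (List Int)) : xsum_alt x = pvNorm x := by
  rw [xsum_alt, pvNorm, pvCells, pv_flatten, ← pv_pvM_eq]
  apply PySem.List.foldl_congr_mem
  intro acc r _
  apply PySem.List.foldl_congr_mem
  intro acc2 c _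
  show max acc2 _ = max acc2 _
  rw [pv_sumF_eq x (r + c), pv_sumB_eq x (r - c)]
  rfl

-- ===== VERDICT (by name: the statement is the Claim_ definition above) =====
theorem xsum_spec : Claim_equal_xsum := by
  intro x _ _
  unfold Spec_xsum
  exact (pv_lemA x).trans (pv_lemB x).symm
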